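-- pv_equiv track=rewrite | github.com/Chubek/CodingChallenges | ReverseFizzBuzz/reverse_fizz_buzz.py | reverse_fizzbuzz
-- ===== SOURCE A (Python) =====
-- def reverse_fizzbuzz(list):
--     """A reverse fizzbuzz function."""
--
--     result = [0, 0]
--     for i in range(0, len(list)):
--         if list[i] == "fizz":
--             result[0] = i + 1
--         elif list[i] == "buzz":
--             result[1] = i + 1
--
--     return result
-- ===== SOURCE B (Python) =====
-- def reverse_fizzbuzz(list):
--     """A reverse fizzbuzz function: last 1-based index of 'fizz' and of 'buzz' (0 if absent)."""
--     n = len(list)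
--     rev = list[::-1]
--     try:
--         fizz = n - rev.index("fizz")
--     except ValueError:
--         fizz = 0
--     try:
--         buzz = n - rev.index("buzz")
--     except ValueError:
--         buzz = 0
--     return [fizz, buzz]
-- ===== Notes on version B (the rewrite author's own statement) =====
-- stated objective: simpler
-- what changed: Replaces the single forward scan that carries two accumulators with two independent last-occurrence queries: each result is len(list) minus the index of the token in the reversed list (0 if absent).
import Mathlib
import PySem

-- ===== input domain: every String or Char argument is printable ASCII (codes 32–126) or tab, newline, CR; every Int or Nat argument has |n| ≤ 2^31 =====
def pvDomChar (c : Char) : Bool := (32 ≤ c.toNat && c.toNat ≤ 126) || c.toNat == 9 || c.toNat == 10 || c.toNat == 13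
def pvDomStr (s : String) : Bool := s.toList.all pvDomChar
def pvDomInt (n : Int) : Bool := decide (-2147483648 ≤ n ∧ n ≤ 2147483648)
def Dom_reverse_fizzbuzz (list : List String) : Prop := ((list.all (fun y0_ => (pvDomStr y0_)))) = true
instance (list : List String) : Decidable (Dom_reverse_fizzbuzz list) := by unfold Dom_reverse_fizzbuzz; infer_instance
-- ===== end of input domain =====

-- B replaces A's single forward scan carrying two accumulators by two independent
-- last-occurrence queries on the reversed list (objective: simpler decomposition, same cost).

-- ===== PORT A =====
-- one forward pass over range(0, len(list)) updating result = [fizz, buzz];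
-- the index i is always in range, so pyGetD with an unused default is exact for list[i]
def reverse_fizzbuzz (list : List String) : List Int :=
  let r := (PySem.List.pyRange 0 (list.length : Int) 1).foldl
    (fun (res : Int × Int) i =>
      if PySem.List.pyGetD list i "" = "fizz" then (i + 1, res.2)
      else if PySem.List.pyGetD list i "" = "buzz" then (res.1, i + 1)
      else res) (0, 0)
  [r.1, r.2]

-- ===== PORT B =====
-- last 1-based index of a token: search the reversed list; ValueError (none) ↦ 0
def pvLastPos (list : List String) (tok : String) : Int :=
  match PySem.List.index? list.reverse tok with
  | some i => (list.length : Int) - (i : Int)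
  | none => 0

def reverse_fizzbuzz_alt (list : List String) : List Int :=
  [pvLastPos list "fizz", pvLastPos list "buzz"]

-- ===== PRECONDITION & SPEC =====
def Spec_reverse_fizzbuzz (list : List String) (out : List Int) : Prop := out = reverse_fizzbuzz_alt list
instance (list : List String) (out : List Int) : Decidable (Spec_reverse_fizzbuzz list out) := by unfold Spec_reverse_fizzbuzz; infer_instance

-- ===== CLAIM (what is proved, stated in full; the proofs are below) =====
def Claim_equal_reverse_fizzbuzz : Prop := ∀ (list : List String), Dom_reverse_fizzbuzz list → Spec_reverse_fizzbuzz list (reverse_fizzbuzz list)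

-- ===== LEMMAS AND PROOFS =====

-- A's loop state after the whole pass is exactly the pair of last-occurrence values
theorem pvLastPos_append_self (xs : List String) (x : String) :
    pvLastPos (xs ++ [x]) x = (xs.length : Int) + 1 := by
  unfold pvLastPos
  rw [show (xs ++ [x]).reverse = x :: xs.reverse by simp, PySem.List.index?_cons_self]
  simp

theorem pvLastPos_append_ne (xs : List String) (x t : String) (h : x ≠ t) :
    pvLastPos (xs ++ [x]) t = pvLastPos xs t := by
  unfold pvLastPos
  rw [show (xs ++ [x]).reverse = x :: xs.reverse by simp, PySem.List.index?_cons_of_ne _ h]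
  cases h' : PySem.List.index? xs.reverse t with
  | none => simp
  | some i =>
    simp only [Option.map_some, List.length_append, List.length_singleton]
    push_cast
    ring

theorem pvFold_eq (xs : List String) :
    (PySem.List.pyRange 0 (xs.length : Int) 1).foldl
      (fun (res : Int × Int) i =>
        if PySem.List.pyGetD xs i "" = "fizz" then (i + 1, res.2)
        else if PySem.List.pyGetD xs i "" = "buzz" then (res.1, i + 1)
        else res) (0, 0)
    = (pvLastPos xs "fizz", pvLastPos xs "buzz") := by
  induction xs using List.reverseRecOn with
  | nil => simp [PySem.List.pyRange_one_eq_nil, pvLastPos, PySem.List.index?]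
  | append_singleton xs x ih =>
    have hlen : ((xs ++ [x]).length : Int) = (xs.length : Int) + 1 := by
      simp
    rw [hlen, PySem.List.pyRange_one_succ_right (by positivity), List.foldl_append]
    have hcongr :
        (PySem.List.pyRange 0 (xs.length : Int) 1).foldl
          (fun (res : Int × Int) i =>
            if PySem.List.pyGetD (xs ++ [x]) i "" = "fizz" then (i + 1, res.2)
            else if PySem.List.pyGetD (xs ++ [x]) i "" = "buzz" then (res.1, i + 1)
            else res) (0, 0)
        = (PySem.List.pyRange 0 (xs.length : Int) 1).foldl
          (fun (res : Int × Int) i =>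
            if PySem.List.pyGetD xs i "" = "fizz" then (i + 1, res.2)
            else if PySem.List.pyGetD xs i "" = "buzz" then (res.1, i + 1)
            else res) (0, 0) := by
      apply PySem.List.foldl_congr_mem
      intro acc i hi
      rw [PySem.List.mem_pyRange_one] at hi
      have h0 : 0 ≤ i := hi.1
      have hlt : i.toNat < xs.length := by omega
      rw [PySem.List.pyGetD_of_nonneg _ _ h0, PySem.List.pyGetD_of_nonneg _ _ h0]
      simp only [List.getD, List.getElem?_append_left hlt]
      rfl
    rw [hcongr, ih]
    simp only [List.foldl_cons, List.foldl_nil]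
    have hget : PySem.List.pyGetD (xs ++ [x]) (xs.length : Int) "" = x := by
      rw [PySem.List.pyGetD_of_nonneg _ _ (by positivity)]
      simp [List.getD]
    rw [hget]
    by_cases hf : x = "fizz"
    · subst hf
      rw [if_pos rfl, pvLastPos_append_self, pvLastPos_append_ne _ _ _ (by decide)]
    · by_cases hb : x = "buzz"
      · subst hb
        rw [if_neg (by simp [hf]), if_pos rfl, pvLastPos_append_self,
            pvLastPos_append_ne _ _ _ (by decide)]
      · rw [if_neg (by simpa using hf), if_neg (by simpa using hb),
            pvLastPos_append_ne _ _ _ (by simpa using hf),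
            pvLastPos_append_ne _ _ _ (by simpa using hb)]

theorem reverse_fizzbuzz_spec : Claim_equal_reverse_fizzbuzz := by
  intro list _
  unfold Spec_reverse_fizzbuzz reverse_fizzbuzz reverse_fizzbuzz_alt
  rw [pvFold_eq]
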